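-- pv_equiv track=rewrite | github.com/lchristie/Sums-of-Roots-of-Unity | SorouGenerator.py | buildTypeSorouArray
-- ===== SOURCE A (Python) =====
-- import itertools
--
-- def buildTypeSorouArray (aTypeMatchingArray):
--     n = len(aTypeMatchingArray)
--     toCheck = set()
--
--     Is = itertools.permutations(range(n))
--     Js = itertools.permutations(range(n))
--
--     for Iperm in Is:
--         for Jperm in Js:
--             zipper = zip(Iperm, Jperm)
--             toCheck.add(tuple(zipper))
--
--     output = set()
--
--     for item in toCheck:
--         shouldAdd = True
--         for indexPair in item:
--             if not aTypeMatchingArray[indexPair[0]][indexPair[1]]: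
--                 shouldAdd = False
--
--         if shouldAdd:
--             output.add(item)
--
--     return output
-- ===== SOURCE B (Python) =====
-- def buildTypeSorouArray(aTypeMatchingArray):
--     # Backtracking: assign one column per row, pruning as soon as a cell is False,
--     # instead of enumerating all n! candidate assignments and filtering.
--     n = len(aTypeMatchingArray)
--
--     def dfs(i, cols):
--         if i == n:
--             return [()]
--         out = []
--         for k in range(len(cols)):
--             j = cols[k]
--             if aTypeMatchingArray[i][j]:
--                 for tail in dfs(i + 1, cols[:k] + cols[k + 1:]):
--                     out.append(((i, j),) + tail)
--         return out
--
--     return set(dfs(0, list(range(n))))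
-- ===== Notes on version B (the rewrite author's own statement) =====
-- stated objective: alternative
-- what changed: B replaces A's generate-all-n!-permutations-then-filter (plus a redundant double loop over an exhausted iterator) with a backtracking DFS that assigns one column per row and abandons a partial assignment as soon as a matrix cell is False.
import Mathlib
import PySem

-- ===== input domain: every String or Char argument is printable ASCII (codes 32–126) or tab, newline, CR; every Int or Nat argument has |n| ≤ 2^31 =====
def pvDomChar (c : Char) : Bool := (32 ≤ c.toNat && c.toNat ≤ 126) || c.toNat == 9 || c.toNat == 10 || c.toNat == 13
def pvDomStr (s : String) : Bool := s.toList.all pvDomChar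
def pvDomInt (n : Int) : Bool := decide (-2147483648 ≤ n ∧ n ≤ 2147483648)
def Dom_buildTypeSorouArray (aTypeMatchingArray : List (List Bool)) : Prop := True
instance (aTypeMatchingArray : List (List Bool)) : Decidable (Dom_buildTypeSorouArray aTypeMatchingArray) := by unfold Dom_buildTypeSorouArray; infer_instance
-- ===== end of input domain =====

-- B replaces A's enumerate-all-n!-assignments-then-filter with a column-per-row backtracking
-- search that abandons a partial assignment as soon as a matrix cell is False (objective: alternative).

-- ===== PORT A =====
-- aTypeMatchingArray[p.1][p.2]; pyGetD is exact under Pre_ (both indices in range there)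
def pvCell (aTypeMatchingArray : List (List Bool)) (p : Int × Int) : Bool :=
  PySem.List.pyGetD (PySem.List.pyGetD aTypeMatchingArray p.1 []) p.2 false

def buildTypeSorouArray (aTypeMatchingArray : List (List Bool)) : List (List (Int × Int)) :=
  let n := aTypeMatchingArray.length
  let Is := PySem.List.permutations (PySem.List.pyRange 0 (n : Int) 1) n
  let Js := PySem.List.permutations (PySem.List.pyRange 0 (n : Int) 1) n
  -- Python's Js is an ITERATOR: the first outer iteration exhausts it, later ones see nothing;
  -- the fold state carries (toCheck, what remains of the Js iterator)
  let st := Is.foldl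
    (fun (st : PySem.Set (List (Int × Int)) × List (List Int)) Iperm =>
      (st.2.foldl (fun s Jperm => PySem.Set.add s (Iperm.zip Jperm)) st.1, []))
    (PySem.Set.empty, Js)
  -- iterates a set to build another set: result independent of Python's hash order
  st.1.foldl
    (fun out item =>
      let shouldAdd := item.foldl
        (fun b indexPair => if pvCell aTypeMatchingArray indexPair = false then false else b) true
      if shouldAdd then PySem.Set.add out item else out)
    PySem.Set.empty

-- ===== PORT B =====
def dfsAlt (aTypeMatchingArray : List (List Bool)) (n : Nat) (i : Nat) (cols : List Int) :
    List (List (Int × Int)) :=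
  if i = n then [[]]
  else
    (List.range cols.length).flatMap (fun k =>
      match _h : cols[k]? with
      | none => []
      | some j =>
        if pvCell aTypeMatchingArray ((i : Int), j) then
          (dfsAlt aTypeMatchingArray n (i + 1) (cols.take k ++ cols.drop (k + 1))).map
            (fun tail => ((i : Int), j) :: tail)
        else [])
termination_by cols.length
decreasing_by
  have hk : k < cols.length := by
    have := List.getElem?_eq_some_iff.mp _h
    exact this.1
  simp [List.length_append, List.length_take, List.length_drop]
  omega

def buildTypeSorouArray_alt (aTypeMatchingArray : List (List Bool)) : List (List (Int × Int)) :=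
  let n := aTypeMatchingArray.length
  PySem.Set.ofList (dfsAlt aTypeMatchingArray n 0 (PySem.List.pyRange 0 (n : Int) 1))

-- ===== PRECONDITION & SPEC =====
-- Pre_ excludes exactly the inputs where Python A raises IndexError: a row shorter than the
-- matrix (aTypeMatchingArray[i][σ(i)] is evaluated for every permutation σ, so any short row
-- is hit whenever n ≥ 1).
def Pre_buildTypeSorouArray (aTypeMatchingArray : List (List Bool)) : Prop :=
  ∀ row ∈ aTypeMatchingArray, aTypeMatchingArray.length ≤ row.length
instance (aTypeMatchingArray : List (List Bool)) : Decidable (Pre_buildTypeSorouArray aTypeMatchingArray) := by unfold Pre_buildTypeSorouArray; infer_instance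

def pvWitness_buildTypeSorouArray : List (List Bool) := [[true, false], [true, true]]

def Spec_buildTypeSorouArray (aTypeMatchingArray : List (List Bool)) (out : List (List (Int × Int))) : Prop := out = buildTypeSorouArray_alt aTypeMatchingArray
instance (aTypeMatchingArray : List (List Bool)) (out : List (List (Int × Int))) : Decidable (Spec_buildTypeSorouArray aTypeMatchingArray out) := by unfold Spec_buildTypeSorouArray; infer_instance

-- ===== CLAIM (what is proved, stated in full; the proofs are below) =====
def Claim_equal_buildTypeSorouArray : Prop := ∀ (aTypeMatchingArray : List (List Bool)), Dom_buildTypeSorouArray aTypeMatchingArray → Pre_buildTypeSorouArray aTypeMatchingArray → Spec_buildTypeSorouArray aTypeMatchingArray (buildTypeSorouArray aTypeMatchingArray)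

-- ===== LEMMAS AND PROOFS =====

-- (i, j) pairs of a column assignment J for rows i, i+1, …
def zipFrom : Int → List Int → List (Int × Int)
  | _, [] => []
  | i, j :: J => (i, j) :: zipFrom (i + 1) J

-- "all cells of assignment J are True", rows counted from i
def goodFrom (M : List (List Bool)) : Int → List Int → Bool
  | _, [] => true
  | i, j :: J => pvCell M (i, j) && goodFrom M (i + 1) J

-- A's shouldAdd loop is List.all
theorem foldl_shouldAdd (M : List (List Bool)) :
    ∀ (item : List (Int × Int)) (b : Bool),
      item.foldl (fun b q => if pvCell M q = false then false else b) b = (b && item.all (pvCell M)) := by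
  intro item
  induction item with
  | nil => intro b; simp
  | cons q item ih =>
    intro b
    rw [List.foldl_cons]
    cases hq : pvCell M q
    · rw [ih]; simp [List.all_cons, hq]
    · rw [ih]; simp [List.all_cons, hq]

-- conditional-add fold = filter then add fold
theorem foldl_condAdd (p : List (Int × Int) → Bool) :
    ∀ (l : List (List (Int × Int))) (acc : PySem.Set (List (Int × Int))),
      l.foldl (fun s x => if p x then PySem.Set.add s x else s) acc
        = (l.filter p).foldl PySem.Set.add acc := by
  intro l
  induction l with
  | nil => intro acc; rfl
  | cons x l ih =>
    intro acc
    cases hx : p x <;> simp [hx, ih]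

-- dedup (Set.ofList) commutes with filter
theorem foldl_add_filter (p : List (Int × Int) → Bool) :
    ∀ (l : List (List (Int × Int))) (acc : List (List (Int × Int))),
      (l.filter p).foldl PySem.Set.add (acc.filter p)
        = (l.foldl PySem.Set.add acc).filter p := by
  intro l
  induction l with
  | nil => intro acc; rfl
  | cons x l ih =>
    intro acc
    have hadd : (PySem.Set.add acc x).filter p = if p x then PySem.Set.add (acc.filter p) x else acc.filter p := by
      by_cases hm : x ∈ acc
      · have : PySem.Set.add acc x = acc := by
          simp [PySem.Set.add, PySem.Set.contains, hm]
        rw [this]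
        cases hx : p x
        · rfl
        · have hmf : x ∈ acc.filter p := List.mem_filter.mpr ⟨hm, hx⟩
          simp [PySem.Set.add, PySem.Set.contains, hmf]
      · have : PySem.Set.add acc x = acc ++ [x] := by
          simp [PySem.Set.add, PySem.Set.contains, hm]
        rw [this, List.filter_append]
        cases hx : p x
        · simp [hx]
        · have hmf : x ∉ acc.filter p := fun hc => hm (List.mem_filter.mp hc).1
          simp [hx, PySem.Set.add, PySem.Set.contains, hmf]
    cases hx : p x
    · have h1 : (PySem.Set.add acc x).filter p = acc.filter p := by
        rw [hadd, if_neg (by simp [hx])]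
      simp only [List.filter_cons, hx, Bool.false_eq_true, if_false, List.foldl_cons]
      rw [← h1, ih (PySem.Set.add acc x)]
    · have h1 : (PySem.Set.add acc x).filter p = PySem.Set.add (acc.filter p) x := by
        rw [hadd, if_pos hx]
      simp only [List.filter_cons, hx, if_true, List.foldl_cons]
      rw [← h1, ih (PySem.Set.add acc x)]

theorem ofList_filter (p : List (Int × Int) → Bool) (l : List (List (Int × Int))) :
    (PySem.Set.ofList l).filter p = PySem.Set.ofList (l.filter p) := by
  rw [PySem.Set.ofList_eq_foldl l, PySem.Set.ofList_eq_foldl (l.filter p)]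
  have := foldl_add_filter p l []
  simpa using this.symm

-- once the Js iterator is exhausted, the outer loop does nothing
theorem foldl_exhausted :
    ∀ (rest : List (List Int)) (s : PySem.Set (List (Int × Int))),
      rest.foldl
        (fun (st : PySem.Set (List (Int × Int)) × List (List Int)) Iperm =>
          (st.2.foldl (fun s Jperm => PySem.Set.add s (Iperm.zip Jperm)) st.1, []))
        (s, ([] : List (List Int)))
        = (s, []) := by
  intro rest
  induction rest with
  | nil => intro s; rfl
  | cons I rest ih => intro s; simp [List.foldl_cons, ih]

-- the first permutation itertools yields is the input itself
theorem permutations_head :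
    ∀ (xs : List Int), ∃ rest, PySem.List.permutations xs xs.length = xs :: rest := by
  intro xs
  induction xs with
  | nil => exact ⟨[], rfl⟩
  | cons x xs ih =>
    obtain ⟨rest, hrest⟩ := ih
    rw [show (x :: xs).length = xs.length + 1 from rfl, PySem.List.permutations]
    rw [show (x :: xs).length = xs.length + 1 from rfl, List.range_succ_eq_map, List.flatMap_cons]
    simp only [List.getElem?_cons_zero, List.eraseIdx_cons_zero]
    rw [hrest]
    exact ⟨_, rfl⟩

-- zip with the identity range is zipFrom
theorem zip_pyRange_eq_zipFrom :
    ∀ (J : List Int) (a : Int), (PySem.List.pyRange a (a + J.length) 1).zip J = zipFrom a J := by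
  intro J
  induction J with
  | nil => intro a; simp [zipFrom]
  | cons j J ih =>
    intro a
    have hab : a < a + (J.length + 1 : Nat) := by push_cast; omega
    rw [show ((j :: J).length : Int) = (J.length : Int) + 1 by push_cast [List.length_cons]; ring]
    rw [PySem.List.pyRange_one_cons (by omega : a < a + ((J.length : Int) + 1))]
    rw [List.zip_cons_cons, zipFrom]
    rw [show a + ((J.length : Int) + 1) = (a + 1) + (J.length : Int) by ring]
    rw [ih (a + 1)]

-- A's per-item test on the zipped pairs is goodFrom on the raw assignment
theorem all_zipFrom (M : List (List Bool)) :
    ∀ (J : List Int) (i : Int), (zipFrom i J).all (pvCell M) = goodFrom M i J := by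
  intro J
  induction J with
  | nil => intro i; rfl
  | cons j J ih => intro i; simp [zipFrom, goodFrom, List.all_cons, ih]

-- MAIN: the backtracking search computes exactly "filter the permutations, zip with the rows"
theorem dfs_eq (M : List (List Bool)) (n : Nat) :
    ∀ (m : Nat) (cols : List Int) (i : Nat), cols.length = m → i + m = n →
      dfsAlt M n i cols
        = ((PySem.List.permutations cols m).filter (goodFrom M (i : Int))).map (zipFrom (i : Int)) := by
  intro m
  induction m with
  | zero =>
    intro cols i hlen hin
    have hc : cols = [] := List.length_eq_zero_iff.mp hlen
    subst hc
    have hi : i = n := by omega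
    rw [dfsAlt, if_pos hi, PySem.List.permutations]
    simp [goodFrom, zipFrom]
  | succ m ih =>
    intro cols i hlen hin
    have hne : i ≠ n := by omega
    rw [dfsAlt, if_neg hne, PySem.List.permutations]
    rw [List.filter_flatMap, List.map_flatMap]
    apply List.flatMap_congr
    intro k _
    cases h : cols[k]? with
    | none => simp
    | some j =>
      have hk : k < cols.length := (List.getElem?_eq_some_iff.mp h).1
      have herase : cols.take k ++ cols.drop (k + 1) = cols.eraseIdx k :=
        (List.eraseIdx_eq_take_drop_succ cols k).symm
      have hlen' : (cols.eraseIdx k).length = m := by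
        rw [List.length_eraseIdx_of_lt hk]; omega
      have hih := ih (cols.eraseIdx k) (i + 1) hlen' (by omega)
      rw [List.filter_map]
      have hcomp : (goodFrom M (i : Int)) ∘ (fun p => j :: p)
          = fun J => pvCell M ((i : Int), j) && goodFrom M ((i : Int) + 1) J := by
        funext J; simp [Function.comp, goodFrom]
      rw [hcomp]
      cases hcell : pvCell M ((i : Int), j) with
      | false =>
        simp [hcell]
      | true =>
        dsimp only
        rw [if_pos hcell, herase, hih]
        simp only [Bool.true_and, List.map_map]
        push_cast
        apply List.map_congr_left
        intro J _
        simp [Function.comp, zipFrom]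

-- ===== VERDICT (by name: the statement is the Claim_ definition above) =====
theorem buildTypeSorouArray_spec : Claim_equal_buildTypeSorouArray := by
  intro M _ _
  unfold Spec_buildTypeSorouArray
  simp only [buildTypeSorouArray, buildTypeSorouArray_alt]
  set n := M.length with hn
  have hlen : (PySem.List.pyRange 0 (n : Int) 1).length = n := by
    rw [PySem.List.length_pyRange_one]; omega
  set I0 := PySem.List.pyRange 0 (n : Int) 1 with hI0
  obtain ⟨rest, hperm⟩ := permutations_head I0
  rw [hlen] at hperm
  rw [hperm, List.foldl_cons]
  dsimp only
  rw [← PySem.Set.update_map_eq_foldl_add (I0 :: rest) (fun J => I0.zip J) PySem.Set.empty]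
  rw [PySem.Set.update_empty]
  rw [foldl_exhausted rest _]
  dsimp only
  simp only [foldl_shouldAdd, Bool.true_and]
  rw [foldl_condAdd (fun item => item.all (pvCell M))]
  have hofl : List.foldl PySem.Set.add PySem.Set.empty
        ((PySem.Set.ofList ((I0 :: rest).map (fun J => I0.zip J))).filter (fun item => item.all (pvCell M)))
      = PySem.Set.ofList ((PySem.Set.ofList ((I0 :: rest).map (fun J => I0.zip J))).filter (fun item => item.all (pvCell M))) :=
    (PySem.Set.ofList_eq_foldl _).symm
  rw [hofl, ofList_filter, PySem.Set.ofList_ofList]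
  have hdfs := dfs_eq M n n I0 0 hlen (by omega)
  rw [hdfs, hperm]
  congr 1
  rw [List.filter_map]
  have hJlen : ∀ J ∈ (I0 :: rest), J.length = n := by
    intro J hJ
    have hJm : J ∈ PySem.List.permutations I0 I0.length := by rw [hlen, hperm]; exact hJ
    rw [(PySem.List.perm_of_mem_permutations hJm).length_eq, hlen]
  have hzip : ∀ J ∈ (I0 :: rest), I0.zip J = zipFrom 0 J := by
    intro J hJ
    have hJl := hJlen J hJ
    have hz := zip_pyRange_eq_zipFrom J 0
    rw [hJl] at hz
    rw [hI0]
    simpa using hz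
  have hfilter : (I0 :: rest).filter ((fun item => item.all (pvCell M)) ∘ (fun J => I0.zip J))
      = (I0 :: rest).filter (goodFrom M 0) := by
    apply List.filter_congr
    intro J hJ
    simp only [Function.comp]
    rw [hzip J hJ, all_zipFrom]
  rw [hfilter]
  simp only [Nat.cast_zero]
  apply List.map_congr_left
  intro J hJ
  rw [hzip J (List.mem_of_mem_filter hJ)]
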